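-- pv_equiv track=rewrite | github.com/jhanschoo/CDCLSAT | graphical/main.py | generate_assignments
-- ===== SOURCE A (Python) =====
-- def generate_assignments(weights):
--   assignment = [ 0 for _ in range(len(weights)) ]
--   in_range = True
--   while in_range:
--     assignment_weight = 1
--     for i in range(len(weights)):
--       if assignment[i] == 1:
--         assignment_weight *= weights[i]
--     yield tuple(assignment), assignment_weight
--     in_range = False
--     for i in range(len(weights) - 1, -1, -1):
--       if assignment[i] == 0:
--         assignment[i] += 1
--         in_range = True
--         break
--       else:
--         assignment[i] = 0
-- ===== SOURCE B (Python) =====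
-- def generate_assignments(weights):
--   # recursive backtracking over positions, threading the running product
--   def rec(rest, bits, w):
--     if not rest:
--       yield tuple(bits), w
--     else:
--       yield from rec(rest[1:], bits + [0], w)
--       yield from rec(rest[1:], bits + [1], w * rest[0])
--   yield from rec(list(weights), [], 1)
-- ===== Notes on version B (the rewrite author's own statement) =====
-- stated objective: alternative
-- what changed: Replaces the imperative binary counter with carry propagation and a per-iteration rescan that recomputes each weight from scratch by recursive backtracking over positions that threads the running product down the recursion and emits leaves in the same lexicographic order.
import Mathlib
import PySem

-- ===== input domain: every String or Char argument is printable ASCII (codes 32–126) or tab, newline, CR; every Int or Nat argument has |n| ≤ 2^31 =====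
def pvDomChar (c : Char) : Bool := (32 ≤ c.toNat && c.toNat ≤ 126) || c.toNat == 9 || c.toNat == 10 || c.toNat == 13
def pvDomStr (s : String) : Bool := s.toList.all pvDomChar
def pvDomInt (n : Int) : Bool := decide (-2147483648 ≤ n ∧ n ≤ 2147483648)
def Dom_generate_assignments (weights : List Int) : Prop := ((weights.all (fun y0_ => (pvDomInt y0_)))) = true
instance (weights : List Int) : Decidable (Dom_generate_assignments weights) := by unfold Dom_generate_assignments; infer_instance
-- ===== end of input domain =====

-- B replaces A's binary counter with carry propagation (and per-iteration weight rescan)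
-- by recursive backtracking that threads the running product; same output, same order.
-- A is a Python generator; equivalence is about the list of yielded values.

-- ===== PORT A =====
-- the inner `for i in range(len(weights)-1,-1,-1)` loop with break, applied to the
-- REVERSED assignment list (index len-1 first): first 0 found is incremented (break,
-- in_range := true); 1s passed on the way are set to 0; loop end gives in_range = false.
def pvIncr : List Int → (List Int × Bool)
  | [] => ([], false)
  | b :: rest =>
    if b = 0 then ((b + 1) :: rest, true)
    else
      let (r, f) := pvIncr rest
      ((0 : Int) :: r, f)

-- the `while in_range` loop; fuel 2^len suffices (proved below); each iteration computes
-- assignment_weight by the `for i in range(len(weights))` fold, yields, then increments.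
def pvLoopA (weights : List Int) : Nat → List Int → List (List Int × Int)
  | 0, _ => []
  | f + 1, assignment =>
    let assignment_weight :=
      (List.range weights.length).foldl
        (fun acc i => if assignment.getD i 0 = 1 then acc * weights.getD i 0 else acc) 1
    let p := pvIncr assignment.reverse
    (assignment, assignment_weight) :: (if p.2 then pvLoopA weights f p.1.reverse else [])

def generate_assignments (weights : List Int) : List (List Int × Int) :=
  pvLoopA weights (2 ^ weights.length) (List.replicate weights.length 0)

-- ===== PORT B =====
-- rec(rest, bits, w) of Source B: leaf yields (bits, w); else branch 0 then branch 1.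
def pvRecB : List Int → List Int → Int → List (List Int × Int)
  | [], bits, w => [(bits, w)]
  | x :: rest, bits, w =>
      pvRecB rest (bits ++ [0]) w ++ pvRecB rest (bits ++ [1]) (w * x)

def generate_assignments_alt (weights : List Int) : List (List Int × Int) :=
  pvRecB weights [] 1

-- ===== PRECONDITION & SPEC =====
def Spec_generate_assignments (weights : List Int) (out : List (List Int × Int)) : Prop := out = generate_assignments_alt weights
instance (weights : List Int) (out : List (List Int × Int)) : Decidable (Spec_generate_assignments weights out) := by unfold Spec_generate_assignments; infer_instance

-- ===== CLAIM (what is proved, stated in full; the proofs are below) =====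
def Claim_equal_generate_assignments : Prop := ∀ (weights : List Int), Dom_generate_assignments weights → Spec_generate_assignments weights (generate_assignments weights)

-- ===== LEMMAS AND PROOFS =====

-- reference enumeration: all bit lists over ws in lexicographic order with their weights
def pvE : List Int → List (List Int × Int)
  | [] => [([], 1)]
  | w :: ws =>
      (pvE ws).map (fun e => ((0 : Int) :: e.1, e.2)) ++
      (pvE ws).map (fun e => ((1 : Int) :: e.1, w * e.2))

-- mathematical weight of an assignment
def pvW : List Int → List Int → Int
  | _, [] => 1
  | [], _ :: _ => 1
  | w :: ws, b :: bs => (if b = 1 then w else 1) * pvW ws bs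

-- value of a bit list, most-significant bit first
def pvVal : List Int → Nat
  | [] => 0
  | b :: bs => b.toNat * 2 ^ bs.length + pvVal bs

-- value, least-significant bit first
def pvValL : List Int → Nat
  | [] => 0
  | b :: bs => b.toNat + 2 * pvValL bs

def pvBin (a : List Int) : Prop := ∀ b ∈ a, b = 0 ∨ b = 1

theorem pvRecB_eq (rest bits : List Int) (w : Int) :
    pvRecB rest bits w = (pvE rest).map (fun e => (bits ++ e.1, w * e.2)) := by
  induction rest generalizing bits w with
  | nil => simp [pvRecB, pvE]
  | cons x rest ih =>
      simp [pvRecB, pvE, ih, List.map_map, Function.comp_def, List.append_assoc, mul_assoc]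

theorem pvE_length (ws : List Int) : (pvE ws).length = 2 ^ ws.length := by
  induction ws with
  | nil => simp [pvE]
  | cons w ws ih => simp [pvE, ih]; ring

theorem pvVal_lt (a : List Int) (h : pvBin a) : pvVal a < 2 ^ a.length := by
  induction a with
  | nil => simp [pvVal]
  | cons b bs ih =>
      have hb' : b = 0 ∨ b = 1 := h b (List.mem_cons_self ..)
      have h2 := ih (fun x hx => h x (List.mem_cons_of_mem _ hx))
      rcases hb' with hb' | hb' <;> subst hb' <;> simp [pvVal, pow_succ] <;> omega

theorem pvVal_append (l : List Int) (b : Int) :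
    pvVal (l ++ [b]) = 2 * pvVal l + b.toNat := by
  induction l with
  | nil => simp [pvVal]
  | cons c l ih => simp [pvVal, ih, pow_succ]; ring

theorem pvVal_reverse (r : List Int) : pvVal r.reverse = pvValL r := by
  induction r with
  | nil => simp [pvVal, pvValL]
  | cons b bs ih => simp [pvValL, List.reverse_cons, pvVal_append, ih]; omega

theorem pvVal_replicate (n : Nat) : pvVal (List.replicate n (0 : Int)) = 0 := by
  induction n with
  | zero => simp [pvVal]
  | succ n ih => simp [List.replicate_succ, pvVal, ih]

theorem pvE_getElem (ws a : List Int) (hb : pvBin a) (hl : a.length = ws.length) :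
    (pvE ws)[pvVal a]? = some (a, pvW ws a) := by
  induction ws generalizing a with
  | nil =>
      have ha : a = [] := List.eq_nil_of_length_eq_zero hl
      subst ha; simp [pvE, pvVal, pvW]
  | cons w ws ih =>
      match a with
      | b :: a' =>
        have hl' : a'.length = ws.length := by simpa using hl
        have hb' : b = 0 ∨ b = 1 := hb b (List.mem_cons_self ..)
        have hbin' : pvBin a' := fun x hx => hb x (List.mem_cons_of_mem _ hx)
        have hlt : pvVal a' < 2 ^ ws.length := hl' ▸ pvVal_lt a' hbin'
        rcases hb' with hb' | hb' <;> subst hb'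
        · have hidx : pvVal ((0 : Int) :: a') = pvVal a' := by simp [pvVal]
          rw [hidx, pvE]
          rw [List.getElem?_append_left (by simpa [pvE_length] using hlt)]
          simp [ih a' hbin' hl', pvW]
        · have hidx : pvVal ((1 : Int) :: a') = 2 ^ ws.length + pvVal a' := by
            simp [pvVal, hl']; try omega
          rw [hidx, pvE]
          rw [List.getElem?_append_right (by simp [pvE_length])]
          simp [pvE_length, ih a' hbin' hl', pvW]

theorem pvFoldl_mul (P : Nat → Prop) [DecidablePred P] (g : Nat → Int) (l : List Nat) (c : Int) :
    l.foldl (fun acc i => if P i then acc * g i else acc) c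
      = c * l.foldl (fun acc i => if P i then acc * g i else acc) 1 := by
  induction l generalizing c with
  | nil => simp
  | cons x l ih =>
      simp only [List.foldl_cons]
      rw [ih, ih (if P x then 1 * g x else 1)]
      split_ifs <;> ring

theorem pvWcalc_eq (ws a : List Int) (hl : a.length = ws.length) :
    (List.range ws.length).foldl
        (fun acc i => if a.getD i 0 = 1 then acc * ws.getD i 0 else acc) 1 = pvW ws a := by
  induction ws generalizing a with
  | nil => match a with | [] => simp [pvW]
  | cons w ws ih =>
      match a with
      | b :: a' =>
        have hl' : a'.length = ws.length := by simpa using hl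
        rw [List.length_cons, List.range_succ_eq_map]
        simp only [List.foldl_cons, List.foldl_map, List.getD_cons_succ, List.getD_cons_zero]
        rw [pvFoldl_mul (fun i => a'.getD i 0 = 1) (fun i => ws.getD i 0)]
        rw [ih a' hl', pvW]
        split_ifs <;> ring

-- increment on the LSB-first list
theorem pvIncr_spec (r : List Int) (hb : pvBin r) :
    (∀ b ∈ r, b = 1) ∧ pvIncr r = (List.replicate r.length 0, false) ∨
    ((pvIncr r).2 = true ∧ pvBin (pvIncr r).1 ∧ (pvIncr r).1.length = r.length ∧
      pvValL (pvIncr r).1 = pvValL r + 1) := by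
  induction r with
  | nil => exact Or.inl ⟨by simp, rfl⟩
  | cons b rest ih =>
      have hb' : b = 0 ∨ b = 1 := hb b (List.mem_cons_self ..)
      have hbin' : pvBin rest := fun x hx => hb x (List.mem_cons_of_mem _ hx)
      rcases hb' with hb' | hb' <;> subst hb'
      · refine Or.inr ?_
        simp [pvIncr, pvValL, pvBin]
        exact ⟨fun x hx => hbin' x hx, by omega⟩
      · rcases ih hbin' with ⟨hall, heq⟩ | ⟨ht, hbin2, hlen2, hval2⟩
        · refine Or.inl ⟨?_, ?_⟩
          · intro x hx
            rcases List.mem_cons.1 hx with h | h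
            · exact h
            · exact hall x h
          · simp [pvIncr, heq, List.replicate_succ]
        · refine Or.inr ⟨?_, ?_, ?_, ?_⟩
          · simpa [pvIncr] using ht
          · intro x hx
            simp only [pvIncr, if_neg (by decide : ¬(1:Int) = 0)] at hx
            rcases List.mem_cons.1 hx with h | h
            · exact Or.inl h
            · exact hbin2 x h
          · simpa [pvIncr] using hlen2
          · simp only [pvIncr, if_neg (by decide : ¬(1:Int) = 0)]
            simp [pvValL, hval2]
            omega

theorem pvValL_ones (r : List Int) (h : ∀ b ∈ r, b = 1) :
    pvValL r = 2 ^ r.length - 1 := by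
  induction r with
  | nil => simp [pvValL]
  | cons b bs ih =>
      have hb : b = 1 := h b (List.mem_cons_self ..)
      have h2 := ih (fun x hx => h x (List.mem_cons_of_mem _ hx))
      have hp : 1 ≤ 2 ^ bs.length := Nat.one_le_two_pow
      subst hb
      simp [pvValL, h2, pow_succ]
      omega

theorem pvLoopA_eq (weights : List Int) (f : Nat) (a : List Int)
    (hb : pvBin a) (hl : a.length = weights.length)
    (hf : f = 2 ^ weights.length - pvVal a) :
    pvLoopA weights f a = (pvE weights).drop (pvVal a) := by
  induction f generalizing a with
  | zero =>
      have := hl ▸ pvVal_lt a hb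
      omega
  | succ f ih =>
      have hlt : pvVal a < 2 ^ weights.length := hl ▸ pvVal_lt a hb
      have hbr : pvBin a.reverse := fun x hx => hb x (List.mem_reverse.1 hx)
      have hvala : pvValL a.reverse = pvVal a := by
        have := pvVal_reverse a.reverse
        simpa using this.symm
      have hget : (pvE weights)[pvVal a]'(by rw [pvE_length]; exact hlt)
          = (a, pvW weights a) := by
        have := pvE_getElem weights a hb hl
        rw [List.getElem?_eq_getElem (by rw [pvE_length]; exact hlt)] at this
        exact Option.some.inj this
      have hdrop : (pvE weights).drop (pvVal a)
          = (a, pvW weights a) :: (pvE weights).drop (pvVal a + 1) := by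
        rw [List.drop_eq_getElem_cons (by rw [pvE_length]; exact hlt), hget]
      rcases pvIncr_spec a.reverse hbr with ⟨hall, heq⟩ | ⟨ht, hbin2, hlen2, hval2⟩
      · have hones : ∀ b ∈ a, b = 1 := fun x hx => hall x (List.mem_reverse.2 hx)
        have hv : pvVal a = 2 ^ weights.length - 1 := by
          have := pvValL_ones a.reverse (by simpa [List.mem_reverse] using hones)
          simp [hvala, hl] at this
          omega
        have hnil : (pvE weights).drop (pvVal a + 1) = [] := by
          apply List.drop_eq_nil_of_le
          rw [pvE_length]; omega
        rw [pvLoopA, heq, hdrop, hnil, pvWcalc_eq weights a hl]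
        simp
      · have hbin3 : pvBin (pvIncr a.reverse).1.reverse :=
          fun x hx => hbin2 x (List.mem_reverse.1 hx)
        have hlen3 : (pvIncr a.reverse).1.reverse.length = weights.length := by
          simp [hlen2, hl]
        have hval3 : pvVal (pvIncr a.reverse).1.reverse = pvVal a + 1 := by
          rw [pvVal_reverse, hval2, hvala]
        rw [pvLoopA, ht, ih _ hbin3 hlen3 (by rw [hval3]; omega), hval3,
            pvWcalc_eq weights a hl, hdrop]
        simp

-- ===== VERDICT (by name: the statement is the Claim_ definition above) =====
theorem generate_assignments_spec : Claim_equal_generate_assignments := by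
  intro weights _
  unfold Spec_generate_assignments generate_assignments generate_assignments_alt
  rw [pvRecB_eq]
  rw [pvLoopA_eq weights _ _ (by intro b hb; simp [List.eq_of_mem_replicate hb])
        (by simp) (by simp [pvVal_replicate])]
  rw [pvVal_replicate]
  simp
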